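-- pv_equiv track=rewrite | github.com/calnighters/advent-of-code-2023 | day3/part-2.py | number_around
-- ===== SOURCE A (Python) =====
-- def number_around(x, y, coords):
--     coords_around = [(x - 1, y - 1), (x, y - 1), (x + 1, y - 1),
--                      (x - 1, y), (x + 1, y),
--                      (x - 1, y + 1), (x, y + 1), (x + 1, y + 1)]
--     for coord in coords:
--         if coord in coords_around:
--             return True
--     return False
-- ===== SOURCE B (Python) =====
-- def number_around(x, y, coords):
--     coord_set = set(coords)
--     for dx in (-1, 0, 1):
--         for dy in (-1, 0, 1):
--             if (dx != 0 or dy != 0) and (x + dx, y + dy) in coord_set: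
--                 return True
--     return False
-- ===== Notes on version B (the rewrite author's own statement) =====
-- stated objective: alternative
-- what changed: Inverts the traversal: instead of scanning coords and testing each against a precomputed 8-neighbor list, B builds a hash set of coords once and probes the 8 neighbor positions of (x,y) against it, so the per-query cost after the set build is O(1) with 8 lookups.
import Mathlib
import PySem

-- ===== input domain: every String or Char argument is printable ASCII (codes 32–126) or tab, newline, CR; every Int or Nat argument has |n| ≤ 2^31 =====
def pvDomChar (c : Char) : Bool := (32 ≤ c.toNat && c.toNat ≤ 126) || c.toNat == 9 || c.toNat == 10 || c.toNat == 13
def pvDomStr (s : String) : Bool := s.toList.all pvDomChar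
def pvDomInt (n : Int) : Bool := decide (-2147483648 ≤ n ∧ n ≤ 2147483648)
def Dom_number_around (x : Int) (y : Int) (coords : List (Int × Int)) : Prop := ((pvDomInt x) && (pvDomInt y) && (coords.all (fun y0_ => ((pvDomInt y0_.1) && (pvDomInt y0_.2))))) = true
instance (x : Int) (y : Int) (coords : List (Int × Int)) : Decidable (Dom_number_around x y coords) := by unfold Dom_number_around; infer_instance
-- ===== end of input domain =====

-- B inverts A's traversal: it builds a set of coords once and probes the 8 neighbor
-- positions of (x,y) against that set, instead of scanning coords against a neighbor list.


-- ===== PORT A =====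
-- the precomputed coords_around list, then the first-match loop over coords
def number_around_loop (coords_around : List (Int × Int)) : List (Int × Int) → Bool
  | [] => false
  | c :: rest => if c ∈ coords_around then true else number_around_loop coords_around rest

def number_around (x : Int) (y : Int) (coords : List (Int × Int)) : Bool :=
  let coords_around : List (Int × Int) :=
    [(x - 1, y - 1), (x, y - 1), (x + 1, y - 1),
     (x - 1, y), (x + 1, y),
     (x - 1, y + 1), (x, y + 1), (x + 1, y + 1)]
  number_around_loop coords_around coords

-- ===== PORT B =====
-- set(coords) built once; then the double loop over deltas probes the set,
-- returning True on the first hit (List.any = first-hit loop over the literal delta lists)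
def number_around_alt (x : Int) (y : Int) (coords : List (Int × Int)) : Bool :=
  let coord_set := PySem.Set.ofList coords
  ([-1, 0, 1] : List Int).any (fun dx =>
    ([-1, 0, 1] : List Int).any (fun dy =>
      (dx != 0 || dy != 0) && coord_set.contains (x + dx, y + dy)))

-- ===== PRECONDITION & SPEC =====
def Spec_number_around (x : Int) (y : Int) (coords : List (Int × Int)) (out : Bool) : Prop := out = number_around_alt x y coords
instance (x : Int) (y : Int) (coords : List (Int × Int)) (out : Bool) : Decidable (Spec_number_around x y coords out) := by unfold Spec_number_around; infer_instance

-- ===== CLAIM (what is proved, stated in full; the proofs are below) =====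
def Claim_equal_number_around : Prop := ∀ (x : Int) (y : Int) (coords : List (Int × Int)), Dom_number_around x y coords → Spec_number_around x y coords (number_around x y coords)

-- ===== LEMMAS AND PROOFS =====

-- A's first-match loop is List.any of list membership
theorem number_around_loop_any (nbrs coords : List (Int × Int)) :
    number_around_loop nbrs coords = coords.any (fun c => decide (c ∈ nbrs)) := by
  induction coords with
  | nil => rfl
  | cons c rest ih =>
    simp only [number_around_loop, List.any_cons, ih]
    by_cases h : c ∈ nbrs <;> simp [h]

theorem set_ofList_contains_iff (coords : List (Int × Int)) (p : Int × Int) :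
    (PySem.Set.ofList coords).contains p = true ↔ p ∈ coords := by
  simp [PySem.Set.mem_ofList]

theorem number_around_eq_alt (x y : Int) (coords : List (Int × Int)) :
    number_around x y coords = number_around_alt x y coords := by
  rw [Bool.eq_iff_iff]
  simp only [number_around, number_around_alt, number_around_loop_any,
    List.any_eq_true, decide_eq_true_eq, set_ofList_contains_iff,
    List.mem_cons, bne_iff_ne, Bool.or_eq_true, Bool.and_eq_true,
    ne_eq, decide_eq_true_eq, List.not_mem_nil, or_false]
  constructor
  · rintro ⟨⟨a, b⟩, hmem, hc⟩
    rcases hc with h|h|h|h|h|h|h|h <;> rw [h] at hmem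
    · exact ⟨-1, Or.inl rfl, -1, Or.inl rfl, by norm_num, by simpa using hmem⟩
    · exact ⟨0, Or.inr (Or.inl rfl), -1, Or.inl rfl, by norm_num, by simpa using hmem⟩
    · exact ⟨1, Or.inr (Or.inr rfl), -1, Or.inl rfl, by norm_num, by simpa using hmem⟩
    · exact ⟨-1, Or.inl rfl, 0, Or.inr (Or.inl rfl), by norm_num, by simpa using hmem⟩
    · exact ⟨1, Or.inr (Or.inr rfl), 0, Or.inr (Or.inl rfl), by norm_num, by simpa using hmem⟩
    · exact ⟨-1, Or.inl rfl, 1, Or.inr (Or.inr rfl), by norm_num, by simpa using hmem⟩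
    · exact ⟨0, Or.inr (Or.inl rfl), 1, Or.inr (Or.inr rfl), by norm_num, by simpa using hmem⟩
    · exact ⟨1, Or.inr (Or.inr rfl), 1, Or.inr (Or.inr rfl), by norm_num, by simpa using hmem⟩
  · rintro ⟨dx, hdx, dy, hdy, hnz, hmem⟩
    refine ⟨(x + dx, y + dy), hmem, ?_⟩
    rcases hdx with h|h|h <;> rcases hdy with h'|h'|h' <;> subst h <;> subst h' <;>
      simp_all [Prod.ext_iff] <;> omega

-- ===== VERDICT (by name: the statement is the Claim_ definition above) =====
theorem number_around_spec : Claim_equal_number_around := by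
  intro x y coords _
  unfold Spec_number_around
  exact number_around_eq_alt x y coords
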